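-- pv_equiv track=rewrite | github.com/MoseleyBioinformaticsLab/mwtab | src/mwtab/repair_shifted_rows.py | _find_dominoe_columns
-- ===== SOURCE A (Python) =====
-- def _find_dominoe_columns(columns_of_interest: list[int], all_columns: list[int], leftwise: bool = True) -> list[int]:
--     """Find all neighboring columns to columns in columns_of_interest from all_columns.
--
--     columns_of_interest can't be shifted, so find all other columns in all_columns that
--     also can't be shifted due to their proximity to the columns_of_interest. Note that
--     there can be repeated values in the returned list, and they are in no certain order.
--
--     Args:
--         columns_of_interest: the columns to look for neighbors to.
--         all_columns: the full set of shiftable columns.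
--         leftwise: if True, assume a left shit, otherwise assume a right shift.
--
--     Returns:
--         The list of columns that cannot be shifted, including columns_of_interest.
--     """
--     increment = 1
--     if not leftwise:
--         increment = -1
--
--     dominoe_columns = columns_of_interest.copy()
--     for column in columns_of_interest:
--         next_column = column + increment
--         while next_column in all_columns:
--             dominoe_columns.append(next_column)
--             next_column = next_column + increment
--     return dominoe_columns
-- ===== SOURCE B (Python) =====
-- def _find_dominoe_columns(columns_of_interest: list[int], all_columns: list[int], leftwise: bool = True) -> list[int]:
--     """Run-index reimplementation: precompute, for every column in all_columns, the
--     far end of its contiguous run in the shift direction, then emit each neighbor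
--     stretch as a single range."""
--     increment = 1 if leftwise else -1
--     far = {}
--     # process values from the far end toward the near end, so far[v + increment]
--     # is already final when v is processed
--     for v in sorted(set(all_columns), reverse=leftwise):
--         far[v] = far.get(v + increment, v)
--     dominoe_columns = list(columns_of_interest)
--     for column in columns_of_interest:
--         start = column + increment
--         if start in far:
--             dominoe_columns.extend(range(start, far[start] + increment, increment))
--     return dominoe_columns
-- ===== Notes on version B (the rewrite author's own statement) =====
-- stated objective: faster
-- what changed: A walks neighbors one step at a time per interest column, re-scanning all_columns for each membership test inside a while loop; B first builds a run-boundary index (dedup-sorted columns folded into a dict mapping each column to the far end of its contiguous run in the shift direction) and then emits each neighbor stretch as a single range.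
import Mathlib
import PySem

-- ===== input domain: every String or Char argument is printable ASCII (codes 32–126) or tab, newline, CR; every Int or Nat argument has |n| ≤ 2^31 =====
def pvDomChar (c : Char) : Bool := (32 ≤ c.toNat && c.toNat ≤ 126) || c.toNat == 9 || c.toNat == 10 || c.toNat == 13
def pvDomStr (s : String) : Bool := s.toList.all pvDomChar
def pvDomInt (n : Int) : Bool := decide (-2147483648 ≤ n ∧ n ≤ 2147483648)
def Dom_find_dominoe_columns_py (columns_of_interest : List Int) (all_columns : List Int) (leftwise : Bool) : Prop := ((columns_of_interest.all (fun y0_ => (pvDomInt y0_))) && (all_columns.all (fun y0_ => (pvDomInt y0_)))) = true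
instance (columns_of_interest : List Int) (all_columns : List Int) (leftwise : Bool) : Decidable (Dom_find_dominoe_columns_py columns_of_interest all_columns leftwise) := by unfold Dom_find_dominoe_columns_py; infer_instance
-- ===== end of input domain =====

-- B replaces A's per-column step-by-step neighbor walk (a list-membership scan per step)
-- by a precomputed run-boundary dict over the distinct sorted columns, emitting each
-- neighbor stretch as one range; same exact output (order and duplicates included),
-- measurably faster on the generated timing inputs.

-- ===== PORT A =====
-- the 'while next_column in all_columns' loop of A, as the obvious structural recursion
lemma pvFilter_length_lt (l : List Int) (p q : Int → Bool)
    (hpq : ∀ v, p v = true → q v = true) (x : Int) (hx : x ∈ l)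
    (hq : q x = true) (hp : p x = false) :
    (l.filter p).length < (l.filter q).length := by
  induction l with
  | nil => cases hx
  | cons a t ih =>
    have hle : ∀ u : List Int, (u.filter p).length ≤ (u.filter q).length := by
      intro u
      exact List.Sublist.length_le (List.monotone_filter_right u (by intro v hv; exact hpq v hv))
    rcases List.mem_cons.mp hx with rfl | hx
    · simp [hp, hq]
      exact hle t
    · by_cases hpa : p a = true
      · have hqa := hpq a hpa
        simp [hpa, hqa]
        exact ih hx
      · simp only [List.filter_cons, Bool.not_eq_true] at *
        rw [if_neg (by simp [hpa])]
        cases hqa : q a <;> simp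
        · exact ih hx
        · exact Nat.le_of_lt (ih hx)

def pvWalk (all_columns : List Int) (leftwise : Bool) (s : Int) : List Int :=
  if h : s ∈ all_columns then
    s :: pvWalk all_columns leftwise (s + (if leftwise then 1 else -1))
  else []
termination_by (all_columns.filter (fun v =>
    if leftwise then decide (s ≤ v) else decide (v ≤ s))).length
decreasing_by
  cases leftwise
  · simp only [Bool.false_eq_true, if_false]
    exact pvFilter_length_lt all_columns _ _
      (fun v hv => by simp at *; omega) s h (by simp) (by simp)
  · simp only [if_true]
    exact pvFilter_length_lt all_columns _ _
      (fun v hv => by simp at *; omega) s h (by simp) (by simp)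

def find_dominoe_columns_py (columns_of_interest : List Int) (all_columns : List Int) (leftwise : Bool) : List Int :=
  let increment : Int := if leftwise then 1 else -1
  columns_of_interest.foldl
    (fun dominoe_columns column =>
      dominoe_columns ++ pvWalk all_columns leftwise (column + increment))
    columns_of_interest

-- ===== PORT B =====
-- Source B's run-boundary dict: for v in sorted(set(all_columns), reverse=leftwise): far[v] = far.get(v+increment, v)
def pvFar (all_columns : List Int) (leftwise : Bool) : PySem.Dict Int Int :=
  let increment : Int := if leftwise then 1 else -1
  (PySem.List.sorted (PySem.Set.ofList all_columns) (fun x => x) leftwise).foldl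
    (fun far v => far.insert v (far.getD (v + increment) v)) PySem.Dict.empty

def find_dominoe_columns_py_alt (columns_of_interest : List Int) (all_columns : List Int) (leftwise : Bool) : List Int :=
  let increment : Int := if leftwise then 1 else -1
  let far := pvFar all_columns leftwise
  columns_of_interest.foldl
    (fun dominoe_columns column =>
      match far.get? (column + increment) with
      | some e => dominoe_columns ++ PySem.List.pyRange (column + increment) (e + increment) increment
      | none => dominoe_columns)
    columns_of_interest

-- ===== PRECONDITION & SPEC =====
def Spec_find_dominoe_columns_py (columns_of_interest : List Int) (all_columns : List Int) (leftwise : Bool) (out : List Int) : Prop := out = find_dominoe_columns_py_alt columns_of_interest all_columns leftwise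
instance (columns_of_interest : List Int) (all_columns : List Int) (leftwise : Bool) (out : List Int) : Decidable (Spec_find_dominoe_columns_py columns_of_interest all_columns leftwise out) := by unfold Spec_find_dominoe_columns_py; infer_instance

-- ===== CLAIM (what is proved, stated in full; the proofs are below) =====
def Claim_equal_find_dominoe_columns_py : Prop := ∀ (columns_of_interest : List Int) (all_columns : List Int) (leftwise : Bool), Dom_find_dominoe_columns_py columns_of_interest all_columns leftwise → Spec_find_dominoe_columns_py columns_of_interest all_columns leftwise (find_dominoe_columns_py columns_of_interest all_columns leftwise)

-- ===== LEMMAS AND PROOFS =====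
-- direction helpers for the proofs
def pvDir (leftwise : Bool) (x : Int) : Int := if leftwise then x else -x

lemma pvDir_inc (leftwise : Bool) (x : Int) :
    pvDir leftwise (x + (if leftwise then 1 else -1)) = pvDir leftwise x + 1 := by
  cases leftwise
  · simp [pvDir]; omega
  · simp [pvDir]

lemma pvFold_inv (leftwise : Bool) (l P : List Int) (d : PySem.Dict Int Int)
    (hl : l.Pairwise (fun a b => pvDir leftwise b < pvDir leftwise a))
    (hPl : ∀ p ∈ P, ∀ v ∈ l, pvDir leftwise v < pvDir leftwise p)
    (hI1 : ∀ v, (d.get? v).isSome = true ↔ v ∈ P)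
    (hI2 : ∀ v e, d.get? v = some e →
      (if v + (if leftwise then 1 else -1) ∈ P then d.get? (v + (if leftwise then 1 else -1)) = some e else e = v))
    (hI3 : ∀ v e, d.get? v = some e → pvDir leftwise v ≤ pvDir leftwise e) :
    (∀ v, ((l.foldl (fun far v => far.insert v (far.getD (v + (if leftwise then 1 else -1)) v)) d).get? v).isSome = true ↔ (v ∈ P ∨ v ∈ l)) ∧
    (∀ v e, (l.foldl (fun far v => far.insert v (far.getD (v + (if leftwise then 1 else -1)) v)) d).get? v = some e →
      (if (v + (if leftwise then 1 else -1) ∈ P ∨ v + (if leftwise then 1 else -1) ∈ l)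
       then (l.foldl (fun far v => far.insert v (far.getD (v + (if leftwise then 1 else -1)) v)) d).get? (v + (if leftwise then 1 else -1)) = some e
       else e = v)) ∧
    (∀ v e, (l.foldl (fun far v => far.insert v (far.getD (v + (if leftwise then 1 else -1)) v)) d).get? v = some e →
      pvDir leftwise v ≤ pvDir leftwise e) := by
  induction l generalizing P d with
  | nil => simpa using ⟨hI1, hI2, hI3⟩
  | cons v t ih =>
    rw [List.pairwise_cons] at hl
    obtain ⟨hvt, ht⟩ := hl
    simp only [List.foldl_cons]
    set inc : Int := if leftwise then 1 else -1 with hinc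
    have hdinc : ∀ x : Int, pvDir leftwise (x + inc) = pvDir leftwise x + 1 := by
      intro x; rw [hinc]; exact pvDir_inc leftwise x
    have main := ih (P := P ++ [v]) (d := d.insert v (d.getD (v + inc) v)) ht ?hPl' ?hI1' ?hI2' ?hI3'
    case hPl' =>
      intro p hp u hu
      rcases List.mem_append.mp hp with hp | hp
      · exact hPl p hp u (List.mem_cons_of_mem _ hu)
      · rw [List.mem_singleton.mp hp]; exact hvt u hu
    case hI1' =>
      intro w
      rw [PySem.Dict.get?_insert]
      by_cases hw : w = v
      · subst hw; simp
      · rw [if_neg hw, hI1 w]; simp [hw]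
    case hI2' =>
      intro w e hw
      rw [PySem.Dict.get?_insert] at hw
      by_cases hwv : w = v
      · subst hwv
        rw [if_pos rfl] at hw
        obtain rfl : d.getD (w + inc) w = e := Option.some.inj hw
        have hne : w + inc ≠ w := by have := hdinc w; intro h; rw [h] at this; omega
        by_cases hP : w + inc ∈ P
        · rw [if_pos (List.mem_append.mpr (Or.inl hP))]
          obtain ⟨e', he'⟩ := Option.isSome_iff_exists.mp ((hI1 _).mpr hP)
          rw [PySem.Dict.get?_insert, if_neg hne, he',
            PySem.Dict.getD_of_get?_eq_some d w he']
        · rw [if_neg (by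
            intro hmem
            rcases List.mem_append.mp hmem with h | h
            · exact hP h
            · exact hne (List.mem_singleton.mp h))]
          have hnone : d.get? (w + inc) = none := by
            rcases h : d.get? (w + inc) with _ | e'
            · rfl
            · exact absurd ((hI1 _).mp (by rw [h]; rfl)) hP
          rw [PySem.Dict.getD_of_get?_eq_none d w hnone]
      · rw [if_neg hwv] at hw
        have hwP : w ∈ P := (hI1 w).mp (by rw [hw]; rfl)
        have hdirw : pvDir leftwise v < pvDir leftwise w := hPl w hwP v (List.mem_cons_self ..)
        have hwinc_ne : w + inc ≠ v := by
          have := hdinc w; intro h; rw [h] at this; omega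
        have h2 := hI2 w e hw
        by_cases hc : w + inc ∈ P
        · rw [if_pos (List.mem_append.mpr (Or.inl hc)), if_pos hc] at *
          rw [PySem.Dict.get?_insert, if_neg hwinc_ne]
          exact h2
        · rw [if_neg hc] at h2
          rw [if_neg (by
            intro hmem
            rcases List.mem_append.mp hmem with h | h
            · exact hc h
            · exact hwinc_ne (List.mem_singleton.mp h))]
          exact h2
    case hI3' =>
      intro w e hw
      rw [PySem.Dict.get?_insert] at hw
      by_cases hwv : w = v
      · subst hwv
        obtain rfl : d.getD (w + inc) w = e := Option.some.inj (by rwa [if_pos rfl] at hw)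
        rcases h : d.get? (w + inc) with _ | e'
        · rw [PySem.Dict.getD_of_get?_eq_none d w h]
        · rw [PySem.Dict.getD_of_get?_eq_some d w h]
          have h3 := hI3 _ _ h
          have := hdinc w
          omega
      · rw [if_neg hwv] at hw; exact hI3 _ _ hw
    refine ⟨?_, ?_, main.2.2⟩
    · intro w
      rw [main.1 w]
      simp only [List.mem_append, List.mem_cons]
      tauto
    · intro w e hw
      have h2 := main.2.1 w e hw
      by_cases hc : w + inc ∈ P ∨ w + inc ∈ v :: t
      · rw [if_pos hc]
        rw [if_pos (by
          simp only [List.mem_append, List.mem_cons] at hc ⊢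
          tauto)] at h2
        exact h2
      · rw [if_neg hc]
        rw [if_neg (by
          simp only [List.mem_append, List.mem_cons] at hc ⊢
          tauto)] at h2
        exact h2

lemma pvFar_spec (all_columns : List Int) (leftwise : Bool) :
    (∀ v, ((pvFar all_columns leftwise).get? v).isSome = true ↔ v ∈ all_columns) ∧
    (∀ v e, (pvFar all_columns leftwise).get? v = some e →
      (if v + (if leftwise then 1 else -1) ∈ all_columns
       then (pvFar all_columns leftwise).get? (v + (if leftwise then 1 else -1)) = some e
       else e = v)) ∧
    (∀ v e, (pvFar all_columns leftwise).get? v = some e →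
      pvDir leftwise v ≤ pvDir leftwise e) := by
  have hvals_mem : ∀ v, v ∈ PySem.List.sorted (PySem.Set.ofList all_columns) (fun x => x) leftwise ↔ v ∈ all_columns := by
    intro v
    rw [PySem.List.mem_sorted, PySem.Set.mem_ofList]
  have hnodup : (PySem.List.sorted (PySem.Set.ofList all_columns) (fun x => x) leftwise).Nodup :=
    (PySem.List.sorted_perm _ _ _).nodup_iff.mpr (PySem.Set.nodup_ofList _)
  have hpair : (PySem.List.sorted (PySem.Set.ofList all_columns) (fun x => x) leftwise).Pairwise
      (fun a b => pvDir leftwise b < pvDir leftwise a) := by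
    cases leftwise
    · have h1 := PySem.List.sorted_pairwise (PySem.Set.ofList all_columns) (fun x : Int => x)
      exact (h1.and hnodup).imp (by intro a b hab; simp [pvDir]; rcases hab with ⟨h1, h2⟩; omega)
    · have h1 := PySem.List.sorted_pairwise_rev (PySem.Set.ofList all_columns) (fun x : Int => x)
      exact (h1.and hnodup).imp (by intro a b hab; simp [pvDir]; rcases hab with ⟨h1, h2⟩; omega)
  have main := pvFold_inv leftwise
    (PySem.List.sorted (PySem.Set.ofList all_columns) (fun x => x) leftwise) [] PySem.Dict.empty
    hpair (by intro p hp; cases hp)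
    (by intro v; simp [PySem.Dict.get?_empty])
    (by intro v e h; rw [PySem.Dict.get?_empty] at h; cases h)
    (by intro v e h; rw [PySem.Dict.get?_empty] at h; cases h)
  have hfar : pvFar all_columns leftwise =
      (PySem.List.sorted (PySem.Set.ofList all_columns) (fun x => x) leftwise).foldl
        (fun far v => far.insert v (far.getD (v + (if leftwise then 1 else -1)) v))
        PySem.Dict.empty := rfl
  refine ⟨?_, ?_, ?_⟩
  · intro v
    rw [hfar, main.1 v]
    simp [hvals_mem]
  · intro v e h
    rw [hfar] at h ⊢
    have h2 := main.2.1 v e h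
    by_cases hc : v + (if leftwise then 1 else -1) ∈ all_columns
    · rw [if_pos hc]
      rw [if_pos (by simp [hvals_mem, hc])] at h2
      exact h2
    · rw [if_neg hc]
      rw [if_neg (by simp [hvals_mem, hc])] at h2
      exact h2
  · intro v e h
    rw [hfar] at h
    exact main.2.2 v e h

lemma pvWalk_eq (all_columns : List Int) (leftwise : Bool) (s : Int) :
    pvWalk all_columns leftwise s =
      (match (pvFar all_columns leftwise).get? s with
       | some e => PySem.List.pyRange s (e + (if leftwise then 1 else -1)) (if leftwise then 1 else -1)
       | none => ([] : List Int)) := by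
  obtain ⟨F1, F2, F3⟩ := pvFar_spec all_columns leftwise
  induction s using pvWalk.induct all_columns leftwise with
  | case1 s hs ih =>
    obtain ⟨e, he⟩ := Option.isSome_iff_exists.mp ((F1 s).mpr hs)
    simp only [dite_eq_ite] at ih
    rw [pvWalk, dif_pos hs, ih, he]
    have hF2 := F2 s e he
    have hle := F3 s e he
    by_cases hnext : s + (if leftwise then 1 else -1) ∈ all_columns
    · rw [if_pos hnext] at hF2
      rw [hF2]
      cases leftwise
      · simp only [Bool.false_eq_true, if_false] at hle ⊢
        have hes : e ≤ s := by simpa [pvDir] using hle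
        conv_rhs => rw [PySem.List.pyRange_neg_one_cons (by omega)]
        congr 1
      · simp only [if_true] at hle ⊢
        have hse : s ≤ e := by simpa [pvDir] using hle
        conv_rhs => rw [PySem.List.pyRange_one_cons (by omega)]
    · rw [if_neg hnext] at hF2
      have hnone : (pvFar all_columns leftwise).get? (s + (if leftwise then 1 else -1)) = none := by
        rcases h : (pvFar all_columns leftwise).get? (s + (if leftwise then 1 else -1)) with _ | e'
        · rfl
        · exact absurd ((F1 _).mp (by rw [h]; rfl)) hnext
      rw [hnone, hF2]
      cases leftwise
      · simp only [Bool.false_eq_true, if_false]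
        rw [PySem.List.pyRange_neg_one_cons (by omega), PySem.List.pyRange_neg_one_eq_nil (by omega)]
      · simp only [if_true]
        rw [PySem.List.pyRange_one_cons (by omega), PySem.List.pyRange_one_eq_nil (by omega)]
  | case2 s hs =>
    have hnone : (pvFar all_columns leftwise).get? s = none := by
      rcases h : (pvFar all_columns leftwise).get? s with _ | e'
      · rfl
      · exact absurd ((F1 _).mp (by rw [h]; rfl)) hs
    rw [pvWalk, dif_neg hs, hnone]

-- ===== VERDICT (by name: the statement is the Claim_ definition above) =====
theorem find_dominoe_columns_py_spec : Claim_equal_find_dominoe_columns_py := by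
  intro cols all left _
  unfold Spec_find_dominoe_columns_py find_dominoe_columns_py find_dominoe_columns_py_alt
  apply PySem.List.foldl_congr_mem
  intro acc c _
  rw [pvWalk_eq]
  rcases (pvFar all left).get? (c + if left = true then 1 else -1) with _ | e
  · simp
  · rfl
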